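-- pv_equiv track=rewrite | github.com/autorevai/getclearance | docs/implementation-guide/03_PHASE1_screening_service.py | _determine_hit_type
-- ===== SOURCE A (Python) =====
-- def _determine_hit_type(match: dict) -> str:
--     """
--     Determine hit type from OpenSanctions result.
--
--     Returns: 'sanctions', 'pep', 'adverse_media', or 'other'
--     """
--     topics = match.get("properties", {}).get("topics", [])
--
--     if any("sanction" in t.lower() for t in topics):
--         return "sanctions"
--     elif any("pep" in t.lower() or "politically exposed" in t.lower() for t in topics):
--         return "pep"
--     elif any("crime" in t.lower() or "fraud" in t.lower() for t in topics):
--         return "adverse_media"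
--     else:
--         return "other"
-- ===== SOURCE B (Python) =====
-- def _determine_hit_type(match: dict) -> str:
--     """Single pass over topics with flags; returns 'sanctions' immediately on the first sanction topic."""
--     topics = match.get("properties", {}).get("topics", [])
--     has_pep = False
--     has_adverse = False
--     for t in topics:
--         tl = t.lower()
--         if "sanction" in tl:
--             return "sanctions"
--         has_pep = has_pep or "pep" in tl or "politically exposed" in tl
--         has_adverse = has_adverse or "crime" in tl or "fraud" in tl
--     return "pep" if has_pep else "adverse_media" if has_adverse else "other"
-- ===== Notes on version B (the rewrite author's own statement) =====
-- stated objective: simpler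
-- what changed: Three separate any-generator scans over topics are replaced by one pass that lowercases each topic once, returns 'sanctions' on first hit, and accumulates pep/adverse flags for the final choice.
import Mathlib
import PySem

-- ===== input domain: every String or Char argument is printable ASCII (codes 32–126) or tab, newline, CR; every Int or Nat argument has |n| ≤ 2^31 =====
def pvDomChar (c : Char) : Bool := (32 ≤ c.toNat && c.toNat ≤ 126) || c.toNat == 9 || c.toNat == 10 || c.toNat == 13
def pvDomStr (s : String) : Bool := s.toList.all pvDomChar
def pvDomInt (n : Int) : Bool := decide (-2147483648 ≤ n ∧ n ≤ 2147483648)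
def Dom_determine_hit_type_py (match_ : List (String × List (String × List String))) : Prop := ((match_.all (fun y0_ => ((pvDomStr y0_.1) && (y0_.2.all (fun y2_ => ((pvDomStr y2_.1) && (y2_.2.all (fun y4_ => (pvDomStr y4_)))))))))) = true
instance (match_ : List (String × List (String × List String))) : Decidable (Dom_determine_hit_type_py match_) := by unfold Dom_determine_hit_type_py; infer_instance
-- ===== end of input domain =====

-- B replaces A's three separate any(...) scans by one pass that lowercases each topic once,
-- returning 'sanctions' immediately and accumulating pep/adverse flags (objective: simpler).

-- ===== PORT A =====
def determine_hit_type_py (match_ : List (String × List (String × List String))) : String :=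
  let topics := ((match_.lookup "properties").getD []).lookup "topics" |>.getD []
  if topics.any (fun t => PySem.Str.isIn "sanction" (PySem.Str.lower t)) then "sanctions"
  else if topics.any (fun t => PySem.Str.isIn "pep" (PySem.Str.lower t)
                      || PySem.Str.isIn "politically exposed" (PySem.Str.lower t)) then "pep"
  else if topics.any (fun t => PySem.Str.isIn "crime" (PySem.Str.lower t)
                      || PySem.Str.isIn "fraud" (PySem.Str.lower t)) then "adverse_media"
  else "other"

-- ===== PORT B =====
def determineHitTypeLoop : List String → Bool → Bool → String
  | [], hasPep, hasAdverse =>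
      if hasPep then "pep" else if hasAdverse then "adverse_media" else "other"
  | t :: rest, hasPep, hasAdverse =>
      let tl := PySem.Str.lower t
      if PySem.Str.isIn "sanction" tl then "sanctions"
      else determineHitTypeLoop rest
        (hasPep || PySem.Str.isIn "pep" tl || PySem.Str.isIn "politically exposed" tl)
        (hasAdverse || PySem.Str.isIn "crime" tl || PySem.Str.isIn "fraud" tl)

def determine_hit_type_py_alt (match_ : List (String × List (String × List String))) : String :=
  let topics := ((match_.lookup "properties").getD []).lookup "topics" |>.getD []
  determineHitTypeLoop topics false false

-- ===== PRECONDITION & SPEC =====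
def Spec_determine_hit_type_py (match_ : List (String × List (String × List String))) (out : String) : Prop := out = determine_hit_type_py_alt match_
instance (match_ : List (String × List (String × List String))) (out : String) : Decidable (Spec_determine_hit_type_py match_ out) := by unfold Spec_determine_hit_type_py; infer_instance

-- ===== CLAIM (what is proved, stated in full; the proofs are below) =====
def Claim_equal_determine_hit_type_py : Prop := ∀ (match_ : List (String × List (String × List String))), Dom_determine_hit_type_py match_ → Spec_determine_hit_type_py match_ (determine_hit_type_py match_)

-- ===== LEMMAS AND PROOFS =====
theorem determineHitTypeLoop_eq (topics : List String) (hp ha : Bool) :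
    determineHitTypeLoop topics hp ha =
      (if topics.any (fun t => PySem.Str.isIn "sanction" (PySem.Str.lower t)) then "sanctions"
       else if hp || topics.any (fun t => PySem.Str.isIn "pep" (PySem.Str.lower t)
                      || PySem.Str.isIn "politically exposed" (PySem.Str.lower t)) then "pep"
       else if ha || topics.any (fun t => PySem.Str.isIn "crime" (PySem.Str.lower t)
                      || PySem.Str.isIn "fraud" (PySem.Str.lower t)) then "adverse_media"
       else "other") := by
  induction topics generalizing hp ha with
  | nil => simp [determineHitTypeLoop]
  | cons t rest ih =>
      cases hs : PySem.Str.isIn "sanction" (PySem.Str.lower t) with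
      | true =>
          simp only [determineHitTypeLoop, hs, List.any_cons, Bool.true_or, if_true]
      | false =>
          simp only [determineHitTypeLoop, hs, ih, List.any_cons, Bool.false_eq_true,
            if_false, Bool.false_or, Bool.or_assoc]

-- ===== VERDICT (by name: the statement is the Claim_ definition above) =====
theorem determine_hit_type_py_spec : Claim_equal_determine_hit_type_py := by
  intro match_ _
  unfold Spec_determine_hit_type_py determine_hit_type_py determine_hit_type_py_alt
  rw [determineHitTypeLoop_eq]
  simp
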